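-- pv_equiv track=rewrite | github.com/xtatus/CSES-Problem-Set | 8_two_sets.py | sequence_1
-- ===== SOURCE A (Python) =====
-- def sequence_1(n):
--     a = []
--     b = []
--     for i in range(1, n+1, 4):
--         a.append(i)
--         a.append(i + 3)
--         b.append(i + 1)
--         b.append(i + 2)
--
--     return a,b
-- ===== SOURCE B (Python) =====
-- def sequence_1(n):
--     m = (n + 3) // 4
--     a = []
--     b = []
--     for x in range(1, 4 * m + 1):
--         if (x - 1) % 4 in (0, 3):
--             a.append(x)
--         else:
--             b.append(x)
--     return a, b
-- ===== Notes on version B (the rewrite author's own statement) =====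
-- stated objective: alternative
-- what changed: Replaces A's step-4 block loop that appends four elements per iteration with a single element-wise pass over 1..4*ceil(n/4) classifying each integer by its residue mod 4.
import Mathlib
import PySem

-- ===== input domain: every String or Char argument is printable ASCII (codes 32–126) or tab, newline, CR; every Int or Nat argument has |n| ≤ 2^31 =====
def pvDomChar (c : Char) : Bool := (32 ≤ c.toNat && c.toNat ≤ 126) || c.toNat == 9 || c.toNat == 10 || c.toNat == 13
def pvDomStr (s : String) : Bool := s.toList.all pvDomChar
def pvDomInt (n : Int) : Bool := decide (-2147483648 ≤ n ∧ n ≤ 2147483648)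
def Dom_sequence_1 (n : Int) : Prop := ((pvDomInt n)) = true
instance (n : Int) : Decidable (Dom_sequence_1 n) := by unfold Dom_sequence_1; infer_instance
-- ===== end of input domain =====

-- B replaces A's step-4 block loop (four appends per block) by an element-wise pass that
-- classifies each x in 1..4*⌈n/4⌉ by (x-1) % 4; same return value (alternative decomposition).


-- ===== PORT A =====
def sequence_1 (n : Int) : List Int × List Int :=
  ((PySem.List.pyRange 1 (n+1) 4).foldl
    (fun (ab : List Int × List Int) i =>
      (ab.1 ++ [i] ++ [i + 3], ab.2 ++ [i + 1] ++ [i + 2]))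
    ([], []))

-- ===== PORT B =====
def sequence_1_alt (n : Int) : List Int × List Int :=
  let m := PySem.Int.floordiv (n + 3) 4
  ((PySem.List.pyRange 1 (4 * m + 1) 1).foldl
    (fun (ab : List Int × List Int) x =>
      if PySem.Int.mod (x - 1) 4 = 0 ∨ PySem.Int.mod (x - 1) 4 = 3 then
        (ab.1 ++ [x], ab.2)
      else
        (ab.1, ab.2 ++ [x]))
    ([], []))

-- ===== PRECONDITION & SPEC =====
def Spec_sequence_1 (n : Int) (out : List Int × List Int) : Prop := out = sequence_1_alt n
instance (n : Int) (out : List Int × List Int) : Decidable (Spec_sequence_1 n out) := by unfold Spec_sequence_1; infer_instance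

-- ===== CLAIM (what is proved, stated in full; the proofs are below) =====
def Claim_equal_sequence_1 : Prop := ∀ (n : Int), Dom_sequence_1 n → Spec_sequence_1 n (sequence_1 n)

-- ===== LEMMAS AND PROOFS =====

-- the two folds, over their respective index lists, reach the same state from any start
theorem pv_key (m : Nat) (s : List Int × List Int) :
    ((List.range m).map (fun (k : Nat) => (1 : Int) + 4 * (k : Int))).foldl
      (fun (ab : List Int × List Int) i =>
        (ab.1 ++ [i] ++ [i + 3], ab.2 ++ [i + 1] ++ [i + 2])) s
    =
    ((List.range (4 * m)).map (fun (k : Nat) => (1 : Int) + 1 * (k : Int))).foldl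
      (fun (ab : List Int × List Int) x =>
        if PySem.Int.mod (x - 1) 4 = 0 ∨ PySem.Int.mod (x - 1) 4 = 3 then
          (ab.1 ++ [x], ab.2)
        else
          (ab.1, ab.2 ++ [x])) s := by
  induction m generalizing s with
  | zero => rfl
  | succ m ih =>
      have h4 : 4 * (m + 1) = (4 * m) + 1 + 1 + 1 + 1 := by ring
      rw [List.range_succ, h4, List.range_succ, List.range_succ, List.range_succ,
        List.range_succ]
      simp only [List.map_append, List.foldl_append, ih]
      have hm0 : PySem.Int.mod ((1 : Int) + 1 * (4 * m : Nat) - 1) 4 = 0 := by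
        rw [PySem.Int.mod_eq_emod_of_pos (by norm_num : (0:Int) < 4)]; push_cast; omega
      have hm1 : PySem.Int.mod ((1 : Int) + 1 * (4 * m + 1 : Nat) - 1) 4 = 1 := by
        rw [PySem.Int.mod_eq_emod_of_pos (by norm_num : (0:Int) < 4)]; push_cast; omega
      have hm2 : PySem.Int.mod ((1 : Int) + 1 * (4 * m + 1 + 1 : Nat) - 1) 4 = 2 := by
        rw [PySem.Int.mod_eq_emod_of_pos (by norm_num : (0:Int) < 4)]; push_cast; omega
      have hm3 : PySem.Int.mod ((1 : Int) + 1 * (4 * m + 1 + 1 + 1 : Nat) - 1) 4 = 3 := by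
        rw [PySem.Int.mod_eq_emod_of_pos (by norm_num : (0:Int) < 4)]; push_cast; omega
      simp only [List.map_cons, List.map_nil, List.foldl_cons, List.foldl_nil,
        hm0, hm1, hm2, hm3]
      norm_num
      constructor <;> first | trivial | (push_cast; ring_nf)

-- ===== VERDICT (by name: the statement is the Claim_ definition above) =====
theorem sequence_1_spec : Claim_equal_sequence_1 := by
  intro n _
  unfold Spec_sequence_1 sequence_1 sequence_1_alt
  have hflo : PySem.Int.floordiv (n + 3) 4 = (n + 3) / 4 :=
    PySem.Int.floordiv_eq_ediv_of_pos (by norm_num)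
  rw [hflo]
  dsimp only
  rw [PySem.List.pyRange_of_pos 1 (n + 1) (by norm_num : (0:Int) < 4),
    PySem.List.pyRange_of_pos 1 (4 * ((n + 3) / 4) + 1) (by norm_num : (0:Int) < 1)]
  have hA : (if (1 : Int) < n + 1 then ((n + 1 - 1 + 4 - 1) / 4).toNat else 0)
      = ((n + 3) / 4).toNat := by
    split_ifs with h
    · congr 1; omega
    · omega
  have hB : (if (1 : Int) < 4 * ((n + 3) / 4) + 1
        then ((4 * ((n + 3) / 4) + 1 - 1 + 1 - 1) / 1).toNat else 0)
      = 4 * ((n + 3) / 4).toNat := by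
    split_ifs with h
    · omega
    · omega
  rw [hA, hB]
  exact pv_key ((n + 3) / 4).toNat ([], [])
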